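-- pv_equiv track=rewrite | github.com/sanketmane/DSA_prep | Stacks/nearest_element_versions.py | distance_from_nearest_small_element_left_index
-- ===== SOURCE A (Python) =====
-- def distance_from_nearest_small_element_left_index(A):
--     n = len(A)
--     ans = []
--     stack = []
--     for i in range(n):
--         while len(stack) > 0 and A[stack[-1]] >= A[i]:
--             stack.pop()
--         if len(stack) == 0:
--             ans.append(-1)
--         else:
--             dist = i-stack[-1]
--             ans.append(dist)
--         stack.append(i)
--     return ans
-- ===== SOURCE B (Python) =====
-- def distance_from_nearest_small_element_left_index(A):
--     def nearest(i):
--         j = i - 1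
--         while j >= 0 and A[j] >= A[i]:
--             j -= 1
--         return -1 if j < 0 else i - j
--     return [nearest(i) for i in range(len(A))]
-- ===== Notes on version B (the rewrite author's own statement) =====
-- stated objective: simpler
-- what changed: Replaced the monotonic index stack with a direct backward scan: for each i, walk left to the first strictly smaller element, computed per-index in a comprehension with no shared stack state.
import Mathlib
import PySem

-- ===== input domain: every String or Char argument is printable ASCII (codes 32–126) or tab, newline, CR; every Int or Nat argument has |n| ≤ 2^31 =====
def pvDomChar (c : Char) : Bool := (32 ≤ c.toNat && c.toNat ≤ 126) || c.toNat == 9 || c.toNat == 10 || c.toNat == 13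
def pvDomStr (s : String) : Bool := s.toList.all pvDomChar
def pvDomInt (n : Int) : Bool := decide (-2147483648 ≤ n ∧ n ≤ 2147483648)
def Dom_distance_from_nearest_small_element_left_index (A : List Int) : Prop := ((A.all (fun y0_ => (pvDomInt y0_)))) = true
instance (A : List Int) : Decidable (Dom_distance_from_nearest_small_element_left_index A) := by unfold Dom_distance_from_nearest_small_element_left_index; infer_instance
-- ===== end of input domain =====

-- B replaces A's shared monotonic index stack with an independent backward scan per index
-- (simpler decomposition, no shared state); same return value on every input.

-- ===== PORT A =====
-- the inner 'while len(stack)>0 and A[stack[-1]] >= A[i]: stack.pop()' loop (top of stack = head)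
def pvPop (A : List Int) (x : Int) : List Nat → List Nat
  | [] => []
  | j :: t => if x ≤ A.getD j 0 then pvPop A x t else j :: t

-- one iteration of A's for-loop: state = (ans, stack)
def pvStepA (A : List Int) (st : List Int × List Nat) (i : Nat) : List Int × List Nat :=
  let s := pvPop A (A.getD i 0) st.2
  match s with
  | [] => (st.1 ++ [-1], i :: s)
  | j :: _ => (st.1 ++ [(i : Int) - (j : Int)], i :: s)

def distance_from_nearest_small_element_left_index (A : List Int) : List Int :=
  ((List.range A.length).foldl (pvStepA A) ([], [])).1

-- ===== PORT B =====
-- B's inner 'j = i-1; while j >= 0 and A[j] >= A[i]: j -= 1' scan; argument is j+1 (0 = j < 0)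
def pvFind (A : List Int) (x : Int) : Nat → Option Nat
  | 0 => none
  | k + 1 => if x ≤ A.getD k 0 then pvFind A x k else some k

def pvNearest (A : List Int) (i : Nat) : Int :=
  match pvFind A (A.getD i 0) i with
  | none => -1
  | some j => (i : Int) - (j : Int)

def distance_from_nearest_small_element_left_index_alt (A : List Int) : List Int :=
  (List.range A.length).map (pvNearest A)

-- ===== PRECONDITION & SPEC =====
def Spec_distance_from_nearest_small_element_left_index (A : List Int) (out : List Int) : Prop := out = distance_from_nearest_small_element_left_index_alt A
instance (A : List Int) (out : List Int) : Decidable (Spec_distance_from_nearest_small_element_left_index A out) := by unfold Spec_distance_from_nearest_small_element_left_index; infer_instance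

-- ===== CLAIM (what is proved, stated in full; the proofs are below) =====
def Claim_equal_distance_from_nearest_small_element_left_index : Prop := ∀ (A : List Int), Dom_distance_from_nearest_small_element_left_index A → Spec_distance_from_nearest_small_element_left_index A (distance_from_nearest_small_element_left_index A)

-- ===== LEMMAS AND PROOFS =====

-- A's stack after processing indices 0..n-1 (top = head)
def pvStk (A : List Int) : Nat → List Nat
  | 0 => []
  | n + 1 => n :: pvPop A (A.getD n 0) (pvStk A n)

-- popping with a lower threshold after a higher one is the same as popping with the lower one directly
theorem pvPop_pvPop (A : List Int) (x y : Int) (hxy : x ≤ y) :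
    ∀ s : List Nat, pvPop A x (pvPop A y s) = pvPop A x s := by
  intro s
  induction s with
  | nil => rfl
  | cons j t ih =>
    by_cases h : y ≤ A.getD j 0
    · have hx : x ≤ A.getD j 0 := le_trans hxy h
      simp only [pvPop, if_pos h, if_pos hx, ih]
    · simp only [pvPop, if_neg h]

-- the top of A's popped stack is exactly the index B's backward scan stops at
theorem head_pvPop_pvStk (A : List Int) :
    ∀ (i : Nat) (x : Int), (pvPop A x (pvStk A i)).head? = pvFind A x i := by
  intro i
  induction i with
  | zero => intro x; rfl
  | succ n ih =>
    intro x
    by_cases h : x ≤ A.getD n 0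
    · simp only [pvStk, pvPop, if_pos h, pvFind, pvPop_pvPop A x (A.getD n 0) h, ih]
    · simp only [pvStk, pvPop, if_neg h, pvFind, List.head?_cons]

theorem foldA_eq (A : List Int) :
    ∀ n : Nat, (List.range n).foldl (pvStepA A) ([], []) = ((List.range n).map (pvNearest A), pvStk A n) := by
  intro n
  induction n with
  | zero => rfl
  | succ n ih =>
    rw [List.range_succ, List.foldl_append, List.map_append, ih]
    have hh := head_pvPop_pvStk A n (A.getD n 0)
    cases hs : pvPop A (A.getD n 0) (pvStk A n) with
    | nil =>
      rw [hs] at hh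
      simp only [List.head?_nil] at hh
      simp only [List.foldl_cons, List.foldl_nil, pvStepA, hs, List.map_cons, List.map_nil,
        pvNearest, ← hh, pvStk]
    | cons j t =>
      rw [hs] at hh
      simp only [List.head?_cons] at hh
      simp only [List.foldl_cons, List.foldl_nil, pvStepA, hs, List.map_cons, List.map_nil,
        pvNearest, ← hh, pvStk]

-- ===== VERDICT (by name: the statement is the Claim_ definition above) =====
theorem distance_from_nearest_small_element_left_index_spec : Claim_equal_distance_from_nearest_small_element_left_index := by
  intro A _
  unfold Spec_distance_from_nearest_small_element_left_index
  unfold distance_from_nearest_small_element_left_index distance_from_nearest_small_element_left_index_alt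
  rw [foldA_eq]
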